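-- pv_equiv track=rewrite | github.com/amelonpie/Introduction-to-Scripting-in-Python | Data Representation/Final Project/isp_diff_template.py | singleline_diff
-- ===== SOURCE A (Python) =====
-- IDENTICAL = -1
--
-- def singleline_diff(line1, line2):
--     """
--     Inputs:
--       line1 - first single line string
--       line2 - second single line string
--     Output:
--       Returns the index where the first difference between
--       line1 and line2 occurs.
--
--       Returns IDENTICAL if the two lines are the same.
--     """
--     longer_line = line1
--     shorter_line = line2
--     if longer_line < shorter_line:
--     #>、<、> = 、< =、比较的规则为：从第一个字符开始比较，排序在前边的字母为小，当一个字符串全部字符和另一个字符串的前部分字符相同时，长度长的字符串为大。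
--         longer_line = line2
--         shorter_line = line1
--     if longer_line == shorter_line:
--         return IDENTICAL
--     idx=0
--     if len(shorter_line)==0:
--         return idx
--     for character in shorter_line:
--         if character == longer_line[idx]:
--             idx+=1
--         else:
--             return idx
--     return idx
-- ===== SOURCE B (Python) =====
-- IDENTICAL = -1
--
-- def singleline_diff(line1, line2):
--     # Binary search for the length of the longest common prefix:
--     # "the first k characters agree" is a monotone predicate in k.
--     lo, hi = 0, min(len(line1), len(line2))
--     while lo < hi:
--         mid = (lo + hi + 1) // 2
--         if line1[:mid] == line2[:mid]:
--             lo = mid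
--         else:
--             hi = mid - 1
--     if lo == len(line1) and lo == len(line2):
--         return IDENTICAL
--     return lo
-- ===== Notes on version B (the rewrite author's own statement) =====
-- stated objective: alternative
-- what changed: B replaces A's lexicographic normalize-then-scan character loop with a binary search (bisection on prefix equality) for the common-prefix length, followed by a length check; no per-character index walk remains.
import Mathlib
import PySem

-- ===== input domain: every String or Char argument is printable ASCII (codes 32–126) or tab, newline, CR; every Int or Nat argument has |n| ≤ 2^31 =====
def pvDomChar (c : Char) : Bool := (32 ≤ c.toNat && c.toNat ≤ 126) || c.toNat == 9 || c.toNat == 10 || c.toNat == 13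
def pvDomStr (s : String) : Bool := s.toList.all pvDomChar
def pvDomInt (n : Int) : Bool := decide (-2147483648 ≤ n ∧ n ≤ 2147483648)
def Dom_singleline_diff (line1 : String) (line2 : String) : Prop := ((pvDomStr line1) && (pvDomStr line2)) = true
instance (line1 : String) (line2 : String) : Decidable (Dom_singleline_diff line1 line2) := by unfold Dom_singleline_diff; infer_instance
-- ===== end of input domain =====

-- B replaces A's lexicographic normalize-then-scan character loop by a binary search
-- (bisection on prefix equality) for the common-prefix length plus a final length check
-- (objective: alternative algorithm, similar cost).

-- ===== PORT A =====
-- 'for character in shorter_line: if character == longer_line[idx]: idx += 1 else: return idx'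
-- longer_line[idx] is PySem.List.pyGet?; the 'none' (IndexError) branch is unreachable because
-- shorter_line is the lexicographically smaller string, so idx stays in range.
def pvLoopA (shorter : List Char) (longer : List Char) (idx : Nat) : Int :=
  match shorter with
  | [] => (idx : Int)
  | c :: rest =>
    match PySem.List.pyGet? longer (idx : Int) with
    | some ch => if c == ch then pvLoopA rest longer (idx + 1) else (idx : Int)
    | none => (idx : Int)

def singleline_diff (line1 : String) (line2 : String) : Int :=
  let longer := if line1 < line2 then line2 else line1
  let shorter := if line1 < line2 then line1 else line2
  if longer == shorter then -1
  else if PySem.Str.len shorter == 0 then 0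
  else pvLoopA shorter.toList longer.toList 0

-- ===== PORT B =====
-- 'while lo < hi: mid = (lo+hi+1)//2; if line1[:mid] == line2[:mid]: lo = mid else: hi = mid-1'
-- lo, hi stay nonneg so the loop state is Nat and '//2' is Nat division (exact here);
-- line1[:mid] with mid ≥ 0 is PySem.List.slice … none (some mid) on the code points (exact).
-- fuel ≥ hi - lo + 1 bounds the iteration count (hi - lo shrinks every step); it only
-- makes the recursion structural and never changes the result.
def pvBisect (l1 l2 : List Char) : Nat → Nat → Nat → Nat
  | 0, lo, _ => lo
  | fuel + 1, lo, hi =>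
    if lo < hi then
      let mid := (lo + hi + 1) / 2
      if PySem.List.slice l1 none (some (mid : Int)) == PySem.List.slice l2 none (some (mid : Int)) then
        pvBisect l1 l2 fuel mid hi
      else
        pvBisect l1 l2 fuel lo (mid - 1)
    else lo

def singleline_diff_alt (line1 : String) (line2 : String) : Int :=
  let l1 := line1.toList
  let l2 := line2.toList
  let lo := pvBisect l1 l2 (min l1.length l2.length + 1) 0 (min l1.length l2.length)
  if lo = l1.length ∧ lo = l2.length then -1 else (lo : Int)

-- ===== PRECONDITION & SPEC =====
def Spec_singleline_diff (line1 : String) (line2 : String) (out : Int) : Prop := out = singleline_diff_alt line1 line2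
instance (line1 : String) (line2 : String) (out : Int) : Decidable (Spec_singleline_diff line1 line2 out) := by unfold Spec_singleline_diff; infer_instance

-- ===== CLAIM (what is proved, stated in full; the proofs are below) =====
def Claim_equal_singleline_diff : Prop := ∀ (line1 : String) (line2 : String), Dom_singleline_diff line1 line2 → Spec_singleline_diff line1 line2 (singleline_diff line1 line2)

-- ===== LEMMAS AND PROOFS =====

/-- Length of the common prefix of two character lists. -/
def pvCp : List Char → List Char → Nat
  | a :: s, b :: t => if a = b then pvCp s t + 1 else 0
  | _, _ => 0

lemma pvCp_nil_left (l : List Char) : pvCp [] l = 0 := by cases l <;> rfl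

lemma pvCp_nil_right (l : List Char) : pvCp l [] = 0 := by cases l <;> rfl

lemma pvCp_cons (a b : Char) (s t : List Char) :
    pvCp (a :: s) (b :: t) = if a = b then pvCp s t + 1 else 0 := rfl

lemma pvCp_comm : ∀ s t : List Char, pvCp s t = pvCp t s := by
  intro s
  induction s with
  | nil => intro t; cases t <;> rfl
  | cons a s ih =>
      intro t
      cases t with
      | nil => rfl
      | cons b t =>
          simp only [pvCp_cons, ih]
          by_cases h : a = b
          · subst h; simp
          · simp [h, Ne.symm h]

lemma pvCp_le_left : ∀ s t : List Char, pvCp s t ≤ s.length := by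
  intro s
  induction s with
  | nil => intro t; simp [pvCp_nil_left]
  | cons a s ih =>
      intro t
      cases t with
      | nil => simp [pvCp]
      | cons b t =>
          simp only [pvCp_cons]
          split <;> simp [ih]

lemma pvCp_le_right (s t : List Char) : pvCp s t ≤ t.length := by
  rw [pvCp_comm]; exact pvCp_le_left t s

lemma pvCp_self : ∀ s : List Char, pvCp s s = s.length := by
  intro s
  induction s with
  | nil => rfl
  | cons a s ih => simp [pvCp_cons, ih]

lemma pvCp_full_eq : ∀ s t : List Char, pvCp s t = s.length → s.length = t.length → s = t := by
  intro s
  induction s with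
  | nil =>
      intro t _ hlen
      cases t with
      | nil => rfl
      | cons b t => simp at hlen
  | cons a s ih =>
      intro t hcp hlen
      cases t with
      | nil => simp at hlen
      | cons b t =>
          simp only [pvCp_cons] at hcp
          by_cases hab : a = b
          · subst hab
            simp only [List.length_cons] at hcp hlen
            rw [if_true] at hcp
            simp only [List.cons.injEq]
            exact ⟨trivial, ih t (by omega) (by omega)⟩
          · simp [hab] at hcp

/-- A's loop computes idx + the common-prefix length of the rest, as long as idx is in range. -/
lemma pvLoopA_eq : ∀ (s l : List Char) (n : Nat), n ≤ l.length →
    pvLoopA s l n = (n : Int) + (pvCp s (l.drop n) : Int) := by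
  intro s
  induction s with
  | nil => intro l n _; simp [pvLoopA, pvCp_nil_left]
  | cons c rest ih =>
      intro l n hn
      rw [pvLoopA]
      rcases Nat.lt_or_ge n l.length with hlt | hge
      · have hget : PySem.List.pyGet? l (n : Int) = some l[n] := by
          simp [PySem.List.pyGet?_natCast, List.getElem?_eq_getElem hlt]
        rw [hget]
        have hdrop : l.drop n = l[n] :: l.drop (n + 1) := (List.getElem_cons_drop hlt).symm
        rw [hdrop, pvCp_cons]
        by_cases hc : c = l[n]
        · simp only [hc, beq_self_eq_true, if_true]
          rw [ih l (n + 1) hlt]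
          push_cast; ring
        · simp [hc]
      · have hn' : n = l.length := le_antisymm hn hge
        have hget : PySem.List.pyGet? l (n : Int) = none := by
          simp [PySem.List.pyGet?_natCast, List.getElem?_eq_none (by omega)]
        rw [hget]
        simp [hn', List.drop_length, pvCp]

/-- 'the first lo characters agree' is exactly 'lo ≤ common-prefix length' (for lo in range). -/
lemma take_eq_iff_le_cp : ∀ (lo : Nat) (l1 l2 : List Char), lo ≤ l1.length → lo ≤ l2.length →
    (l1.take lo = l2.take lo ↔ lo ≤ pvCp l1 l2) := by
  intro lo
  induction lo with
  | zero => intro l1 l2 _ _; simp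
  | succ lo ih =>
      intro l1 l2 h1 h2
      cases l1 with
      | nil => simp at h1
      | cons a s =>
        cases l2 with
        | nil => simp at h2
        | cons b t =>
          simp only [List.take_succ_cons, List.cons.injEq, pvCp_cons]
          by_cases hab : a = b
          · subst hab
            rw [if_pos rfl]
            simp only [List.length_cons] at h1 h2
            simp only [true_and]
            rw [ih s t (by omega) (by omega)]
            omega
          · simp [hab]

/-- The bisection converges to the common-prefix length. -/
lemma pvBisect_eq : ∀ (k : Nat) (l1 l2 : List Char) (lo hi : Nat), hi - lo < k →
    lo ≤ pvCp l1 l2 → pvCp l1 l2 ≤ hi → hi ≤ min l1.length l2.length →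
    pvBisect l1 l2 k lo hi = pvCp l1 l2 := by
  intro k
  induction k with
  | zero =>
      intro l1 l2 lo hi hk hlo hhi _
      omega
  | succ k ih =>
      intro l1 l2 lo hi hk hlo hhi hmin
      rw [pvBisect]
      by_cases h : lo < hi
      · rw [if_pos h]
        simp only
        have hmid1 : lo < (lo + hi + 1) / 2 := by omega
        have hmid2 : (lo + hi + 1) / 2 ≤ hi := by omega
        have hs1 : PySem.List.slice l1 none (some (((lo + hi + 1) / 2 : Nat) : Int))
            = l1.take ((lo + hi + 1) / 2) := PySem.List.slice_to_natCast l1 _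
        have hs2 : PySem.List.slice l2 none (some (((lo + hi + 1) / 2 : Nat) : Int))
            = l2.take ((lo + hi + 1) / 2) := PySem.List.slice_to_natCast l2 _
        rw [hs1, hs2]
        have hiff := take_eq_iff_le_cp ((lo + hi + 1) / 2) l1 l2 (by omega) (by omega)
        by_cases hc : l1.take ((lo + hi + 1) / 2) = l2.take ((lo + hi + 1) / 2)
        · rw [if_pos (by exact beq_iff_eq.mpr hc)]
          exact ih l1 l2 _ hi (by omega) (hiff.mp hc) hhi hmin
        · rw [if_neg (by simpa using hc)]
          have : ¬ ((lo + hi + 1) / 2 ≤ pvCp l1 l2) := fun hle => hc (hiff.mpr hle)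
          exact ih l1 l2 lo _ (by omega) hlo (by omega) (by omega)
      · rw [if_neg h]
        omega

lemma singleline_diff_alt_eq (line1 line2 : String) :
    singleline_diff_alt line1 line2 =
      if line1 = line2 then -1 else (pvCp line1.toList line2.toList : Int) := by
  have h1 := pvCp_le_left line1.toList line2.toList
  have h2 := pvCp_le_right line1.toList line2.toList
  have hb := pvBisect_eq (min line1.toList.length line2.toList.length + 1) line1.toList line2.toList
      0 (min line1.toList.length line2.toList.length) (by omega) (Nat.zero_le _)
      (by omega) (le_refl _)
  simp only [singleline_diff_alt, hb]
  by_cases heq : line1 = line2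
  · subst heq
    rw [if_pos ⟨by simp [pvCp_self], by simp [pvCp_self]⟩, if_pos rfl]
  · have hne : line1.toList ≠ line2.toList := fun h => heq (String.toList_inj.mp h)
    rw [if_neg heq, if_neg ?_]
    rintro ⟨hl1, hl2⟩
    exact hne (pvCp_full_eq _ _ hl1 (by omega))

lemma singleline_diff_eq (line1 line2 : String) :
    singleline_diff line1 line2 =
      if line1 = line2 then -1 else (pvCp line1.toList line2.toList : Int) := by
  by_cases hlt : line1 < line2
  · simp only [singleline_diff, hlt, if_true, beq_iff_eq]
    by_cases heq : line1 = line2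
    · subst heq; simp
    · rw [if_neg (Ne.symm heq), if_neg heq]
      have hloop := pvLoopA_eq line1.toList line2.toList 0 (Nat.zero_le _)
      simp only [List.drop_zero, Int.natCast_zero, zero_add] at hloop
      by_cases hz : PySem.Str.len line1 = 0
      · rw [if_pos hz]
        have hnil : line1.toList = [] := by
          have hl := PySem.Str.len_eq line1
          rw [hz] at hl
          exact List.length_eq_zero_iff.mp (by exact_mod_cast hl.symm)
        simp [hnil, pvCp_nil_left]
      · rw [if_neg hz, hloop]
  · simp only [singleline_diff, hlt, if_false, beq_iff_eq]
    by_cases heq : line1 = line2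
    · subst heq; simp
    · rw [if_neg heq, if_neg heq]
      have hloop := pvLoopA_eq line2.toList line1.toList 0 (Nat.zero_le _)
      simp only [List.drop_zero, Int.natCast_zero, zero_add] at hloop
      by_cases hz : PySem.Str.len line2 = 0
      · rw [if_pos hz]
        have hnil : line2.toList = [] := by
          have hl := PySem.Str.len_eq line2
          rw [hz] at hl
          exact List.length_eq_zero_iff.mp (by exact_mod_cast hl.symm)
        simp [hnil, pvCp_nil_right]
      · rw [if_neg hz, hloop, pvCp_comm]

-- ===== VERDICT (by name: the statement is the Claim_ definition above) =====
theorem singleline_diff_spec : Claim_equal_singleline_diff := by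
  intro line1 line2 _
  unfold Spec_singleline_diff
  rw [singleline_diff_eq, singleline_diff_alt_eq]
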